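-- pv_equiv track=rewrite | github.com/ShaunRW/CrackTheCode | crack.py | contains_but_wrong_position
-- ===== SOURCE A (Python) =====
-- def contains_but_wrong_position(subject, test, required_match_count):
--     count = 0
--     for index in range(0, 3):
--         if subject[index] == test[index]:
--             return False
--         if subject[index] in test:
--             count += 1
--     return count == required_match_count
-- ===== SOURCE B (Python) =====
-- def contains_but_wrong_position(subject, test, required_match_count):
--     # Option-valued recursion on the strings themselves: no indices, no range,
--     # no accumulator. A positional match yields None (veto) which propagates up;
--     # otherwise the membership-hit count of the suffix is composed on the way
--     # back out of the recursion.
--     def walk(s, t, remaining):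
--         if remaining == 0:
--             return 0
--         if s[0] == t[0]:
--             return None
--         tail = walk(s[1:], t[1:], remaining - 1)
--         if tail is None:
--             return None
--         return tail + (s[0] in test)
--     hits = walk(subject, test, 3)
--     return hits is not None and hits == required_match_count
-- ===== Notes on version B (the rewrite author's own statement) =====
-- stated objective: alternative
-- what changed: Replaces A's index-driven loop over range(3) with a running count accumulator by an Option-valued recursion on the two strings themselves (slicing off one character at a time): a positional match returns None which propagates up, and the membership-hit count is composed on the way back out of the recursion rather than accumulated forward.
import Mathlib
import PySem

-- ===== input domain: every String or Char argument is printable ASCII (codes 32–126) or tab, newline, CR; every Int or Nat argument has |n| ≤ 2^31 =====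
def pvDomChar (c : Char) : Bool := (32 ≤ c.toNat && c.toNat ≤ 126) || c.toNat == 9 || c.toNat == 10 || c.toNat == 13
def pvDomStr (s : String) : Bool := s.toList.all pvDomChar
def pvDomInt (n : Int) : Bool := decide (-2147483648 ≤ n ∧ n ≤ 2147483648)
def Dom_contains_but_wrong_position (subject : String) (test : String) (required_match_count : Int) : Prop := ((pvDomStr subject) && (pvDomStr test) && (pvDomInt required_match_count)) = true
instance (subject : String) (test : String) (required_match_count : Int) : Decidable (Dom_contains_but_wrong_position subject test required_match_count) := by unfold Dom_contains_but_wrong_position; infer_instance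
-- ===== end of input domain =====

-- B replaces A's index-driven loop with a forward count accumulator by an
-- Option-valued recursion on the strings themselves: a positional match yields
-- none (veto), the hit count is composed on the way back out; objective: alternative.

-- ===== PORT A =====
-- A's for-loop over range(0,3) with early return and a count accumulator.
def pvA_loop (s t : List Char) (rmc : Int) (count : Int) : List Nat → Bool
  | [] => decide (count = rmc)
  | i :: rest =>
    match s[i]?, t[i]? with
    | some a, some b =>
      if a = b then false
      else if a ∈ t then pvA_loop s t rmc (count + 1) rest
      else pvA_loop s t rmc count rest
    | _, _ => false   -- IndexError; excluded by Pre_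

def contains_but_wrong_position (subject : String) (test : String) (required_match_count : Int) : Bool :=
  pvA_loop subject.toList test.toList required_match_count 0 [0, 1, 2]

-- ===== PORT B =====
-- Source B's walk: recursion on the two char lists, Option Int result (none = veto),
-- count added on the way back.  IndexError (s[0]/t[0] of an empty string, outside
-- Pre_) is rendered as none.
def pvB_walk (test : List Char) : List Char → List Char → Nat → Option Int
  | _, _, 0 => some 0
  | s, t, Nat.succ r =>
    match s.head?, t.head? with
    | some a, some b =>
      if a = b then none
      else
        match pvB_walk test s.tail t.tail r with
        | none => none
        | some tailHits => some (tailHits + (if a ∈ test then 1 else 0))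
    | _, _ => none   -- IndexError; excluded by Pre_

def contains_but_wrong_position_alt (subject : String) (test : String) (required_match_count : Int) : Bool :=
  match pvB_walk test.toList subject.toList test.toList 3 with
  | none => false
  | some hits => decide (hits = required_match_count)

-- ===== PRECONDITION & SPEC =====
-- Pre_ excludes exactly the inputs on which A raises IndexError: the loop reaches
-- an index i < 3 (no earlier position was an exact match) that is out of range of
-- subject or test.  B raises on exactly the same inputs.
def Pre_contains_but_wrong_position (subject : String) (test : String) (required_match_count : Int) : Prop :=
  ∀ i : Nat, i < 3 →
    (∀ j : Nat, j < i → j < subject.toList.length ∧ j < test.toList.length ∧ subject.toList[j]? ≠ test.toList[j]?) →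
    i < subject.toList.length ∧ i < test.toList.length
instance (subject : String) (test : String) (required_match_count : Int) : Decidable (Pre_contains_but_wrong_position subject test required_match_count) := by unfold Pre_contains_but_wrong_position; infer_instance

def pvWitness_contains_but_wrong_position : String × String × Int := ("abc", "bca", 3)

def Spec_contains_but_wrong_position (subject : String) (test : String) (required_match_count : Int) (out : Bool) : Prop := out = contains_but_wrong_position_alt subject test required_match_count
instance (subject : String) (test : String) (required_match_count : Int) (out : Bool) : Decidable (Spec_contains_but_wrong_position subject test required_match_count out) := by unfold Spec_contains_but_wrong_position; infer_instance

-- ===== CLAIM (what is proved, stated in full; the proofs are below) =====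
def Claim_equal_contains_but_wrong_position : Prop := ∀ (subject : String) (test : String) (required_match_count : Int), Dom_contains_but_wrong_position subject test required_match_count → Pre_contains_but_wrong_position subject test required_match_count → Spec_contains_but_wrong_position subject test required_match_count (contains_but_wrong_position subject test required_match_count)

-- ===== LEMMAS AND PROOFS =====

theorem pv_main (ls lt : List Char) (rmc : Int)
    (hp : ∀ i : Nat, i < 3 →
      (∀ j : Nat, j < i → j < ls.length ∧ j < lt.length ∧ ls[j]? ≠ lt[j]?) →
      i < ls.length ∧ i < lt.length) :
    pvA_loop ls lt rmc 0 [0, 1, 2] =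
      (match pvB_walk lt ls lt 3 with
       | none => false
       | some hits => decide (hits = rmc)) := by
  obtain ⟨h0s, h0t⟩ := hp 0 (by omega) (by omega)
  obtain ⟨a0, ls1, rfl⟩ : ∃ a l, ls = a :: l := by
    cases ls with
    | nil => simp at h0s
    | cons a l => exact ⟨a, l, rfl⟩
  obtain ⟨b0, lt1, rfl⟩ : ∃ b l, lt = b :: l := by
    cases lt with
    | nil => simp at h0t
    | cons b l => exact ⟨b, l, rfl⟩
  by_cases e0 : a0 = b0
  · simp [pvA_loop, pvB_walk, e0]
  · obtain ⟨h1s, h1t⟩ := hp 1 (by omega) (by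
      intro j hj
      interval_cases j
      simpa using e0)
    obtain ⟨a1, ls2, rfl⟩ : ∃ a l, ls1 = a :: l := by
      cases ls1 with
      | nil => simp at h1s
      | cons a l => exact ⟨a, l, rfl⟩
    obtain ⟨b1, lt2, rfl⟩ : ∃ b l, lt1 = b :: l := by
      cases lt1 with
      | nil => simp at h1t
      | cons b l => exact ⟨b, l, rfl⟩
    by_cases e1 : a1 = b1
    · simp [pvA_loop, pvB_walk, e0, e1]
    · obtain ⟨h2s, h2t⟩ := hp 2 (by omega) (by
        intro j hj
        interval_cases j
        · simpa using e0
        · simpa using e1)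
      obtain ⟨a2, ls3, rfl⟩ : ∃ a l, ls2 = a :: l := by
        cases ls2 with
        | nil => simp at h2s
        | cons a l => exact ⟨a, l, rfl⟩
      obtain ⟨b2, lt3, rfl⟩ : ∃ b l, lt2 = b :: l := by
        cases lt2 with
        | nil => simp at h2t
        | cons b l => exact ⟨b, l, rfl⟩
      by_cases e2 : a2 = b2
      · simp [pvA_loop, pvB_walk, e0, e1, e2]
      · by_cases m0 : a0 ∈ b0 :: b1 :: b2 :: lt3 <;>
        by_cases m1 : a1 ∈ b0 :: b1 :: b2 :: lt3 <;>
        by_cases m2 : a2 ∈ b0 :: b1 :: b2 :: lt3 <;>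
        simp [pvA_loop, pvB_walk, e0, e1, e2, m0, m1, m2]

-- ===== VERDICT (by name: the statement is the Claim_ definition above) =====
theorem contains_but_wrong_position_spec : Claim_equal_contains_but_wrong_position := by
  intro subject test rmc _ hpre
  unfold Spec_contains_but_wrong_position contains_but_wrong_position contains_but_wrong_position_alt
  exact pv_main subject.toList test.toList rmc hpre
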